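-- pv_equiv track=rewrite | github.com/Kunedawg/CodingProblems | problem-sets/jane-street/2024-05/__main__.py | are_blacks_sparse
-- ===== SOURCE A (Python) =====
-- def are_blacks_sparse(array_of_rows):
--     # expects array of length two. objects in a array are equal length arrays.
--     # Initialize a set to keep track of positions where the value is found
--     positions = set()
--     for row in array_of_rows:
--         for idx, element in enumerate(row):
--             if element == 10:  # 10 represents black
--                 if idx in positions:
--                     return False  # Value found in the same position
--                 positions.add(idx)
--     return True
-- ===== SOURCE B (Python) =====
-- def are_blacks_sparse(array_of_rows):
--     # Column-wise: value 10 must appear at most once per column index.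
--     width = max((len(row) for row in array_of_rows), default=0)
--     for i in range(width):
--         if sum(1 for row in array_of_rows if i < len(row) and row[i] == 10) > 1:
--             return False
--     return True
-- ===== Notes on version B (the rewrite author's own statement) =====
-- stated objective: alternative
-- what changed: Replaces the row scan that maintains a seen-index set with a column-wise pass that counts occurrences of 10 per column index and checks no count exceeds 1.
import Mathlib
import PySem

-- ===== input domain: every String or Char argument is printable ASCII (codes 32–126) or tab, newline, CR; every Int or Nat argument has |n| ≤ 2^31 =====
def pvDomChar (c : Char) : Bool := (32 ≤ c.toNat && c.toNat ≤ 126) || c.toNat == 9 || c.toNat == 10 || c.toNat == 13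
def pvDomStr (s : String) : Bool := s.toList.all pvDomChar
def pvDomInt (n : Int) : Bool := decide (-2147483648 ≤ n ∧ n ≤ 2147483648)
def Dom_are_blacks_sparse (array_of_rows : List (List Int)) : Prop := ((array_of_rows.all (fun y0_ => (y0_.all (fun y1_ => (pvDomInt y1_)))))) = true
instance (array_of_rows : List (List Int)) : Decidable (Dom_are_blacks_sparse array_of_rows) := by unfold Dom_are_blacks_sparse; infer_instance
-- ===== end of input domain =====

-- B changes the algorithm: a column-wise count of 10s instead of A's row scan with a seen-index set (alternative, not faster).

-- ===== PORT A =====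
-- inner loop: 'for idx, element in enumerate(row)', early return None on a repeated column index
def pvGoRow (positions : PySem.Set Int) (idx : Int) : List Int → Option (PySem.Set Int)
  | [] => some positions
  | element :: rest =>
    if element = 10 then
      if PySem.Set.contains positions idx then none
      else pvGoRow (PySem.Set.add positions idx) (idx + 1) rest
    else pvGoRow positions (idx + 1) rest

-- outer loop: 'for row in array_of_rows'
def pvGoRows (positions : PySem.Set Int) : List (List Int) → Bool
  | [] => true
  | row :: rest =>
    match pvGoRow positions 0 row with
    | none => false
    | some p => pvGoRows p rest

def are_blacks_sparse (array_of_rows : List (List Int)) : Bool :=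
  pvGoRows PySem.Set.empty array_of_rows

-- ===== PORT B =====
-- 'sum(1 for row in array_of_rows if i < len(row) and row[i] == 10)'
def pvColCount (rows : List (List Int)) (i : Nat) : Nat :=
  rows.foldl (fun acc row => if h : i < row.length then (if row[i] = 10 then acc + 1 else acc) else acc) 0

def are_blacks_sparse_alt (array_of_rows : List (List Int)) : Bool :=
  let width := array_of_rows.foldl (fun m row => max m row.length) 0
  (List.range width).all (fun i => !(decide (pvColCount array_of_rows i > 1)))

-- ===== PRECONDITION & SPEC =====
def Spec_are_blacks_sparse (array_of_rows : List (List Int)) (out : Bool) : Prop := out = are_blacks_sparse_alt array_of_rows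
instance (array_of_rows : List (List Int)) (out : Bool) : Decidable (Spec_are_blacks_sparse array_of_rows out) := by unfold Spec_are_blacks_sparse; infer_instance

-- ===== CLAIM (what is proved, stated in full; the proofs are below) =====
def Claim_equal_are_blacks_sparse : Prop := ∀ (array_of_rows : List (List Int)), Dom_are_blacks_sparse array_of_rows → Spec_are_blacks_sparse array_of_rows (are_blacks_sparse array_of_rows)

-- ===== LEMMAS AND PROOFS =====

-- 'row has a 10 at (int) column index i'
def pvTenB (row : List Int) (i : Int) : Bool := decide (0 ≤ i) && (row[i.toNat]? == some 10)

-- number of rows with a 10 in column i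
def pvCnt (rows : List (List Int)) (i : Int) : Nat := rows.countP (fun row => pvTenB row i)

theorem pvTenB_iff (row : List Int) (i : Int) :
    pvTenB row i = true ↔ ∃ j : Nat, ∃ h : j < row.length, i = (j : Int) ∧ row[j] = 10 := by
  simp only [pvTenB, Bool.and_eq_true, decide_eq_true_eq, beq_iff_eq]
  constructor
  · rintro ⟨h0, hg⟩
    have hlt : i.toNat < row.length := by
      rcases Nat.lt_or_ge i.toNat row.length with h | h
      · exact h
      · rw [List.getElem?_eq_none h] at hg; cases hg
    refine ⟨i.toNat, hlt, by omega, ?_⟩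
    rw [List.getElem?_eq_getElem hlt] at hg; exact Option.some.inj hg
  · rintro ⟨j, hj, rfl, hv⟩
    exact ⟨by positivity, by simp [List.getElem?_eq_getElem, hj, hv]⟩

theorem pvGoRow_none_iff (row : List Int) (p : PySem.Set Int) (k : Int) :
    pvGoRow p k row = none ↔
      ∃ j : Nat, ∃ h : j < row.length, row[j] = 10 ∧ (k + (j : Int)) ∈ p := by
  induction row generalizing p k with
  | nil => simp [pvGoRow]
  | cons e rest ih =>
    simp only [pvGoRow]
    by_cases he : e = 10
    · rw [if_pos he]
      by_cases hk : PySem.Set.contains p k = true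
      · rw [if_pos hk]
        constructor
        · intro _
          exact ⟨0, by simp, by simpa using he,
            by simpa using (PySem.Set.contains_iff p k).mp hk⟩
        · intro _; rfl
      · rw [if_neg hk, ih]
        constructor
        · rintro ⟨j, hj, hv, hmem⟩
          rcases (PySem.Set.mem_add p k (k + 1 + (j : Int))).mp hmem with hmem | heq
          · refine ⟨j + 1, by simpa using hj, by simpa using hv, ?_⟩
            have harith : k + ((j + 1 : Nat) : Int) = k + 1 + (j : Int) := by push_cast; ring
            rw [harith]; exact hmem
          · exfalso; omega
        · rintro ⟨j, hj, hv, hmem⟩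
          match j with
          | 0 =>
            exact absurd ((PySem.Set.contains_iff p k).mpr (by simpa using hmem)) hk
          | j + 1 =>
            refine ⟨j, by simpa using hj, by simpa using hv, ?_⟩
            apply (PySem.Set.mem_add p k (k + 1 + (j : Int))).mpr
            left
            have harith : k + ((j + 1 : Nat) : Int) = k + 1 + (j : Int) := by push_cast; ring
            rw [harith] at hmem; exact hmem
    · rw [if_neg he, ih]
      constructor
      · rintro ⟨j, hj, hv, hmem⟩
        refine ⟨j + 1, by simpa using hj, by simpa using hv, ?_⟩
        have harith : k + ((j + 1 : Nat) : Int) = k + 1 + (j : Int) := by push_cast; ring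
        rw [harith]; exact hmem
      · rintro ⟨j, hj, hv, hmem⟩
        match j with
        | 0 => exact absurd (by simpa using hv) he
        | j + 1 =>
          refine ⟨j, by simpa using hj, by simpa using hv, ?_⟩
          have harith : k + ((j + 1 : Nat) : Int) = k + 1 + (j : Int) := by push_cast; ring
          rw [harith] at hmem; exact hmem

theorem pvGoRow_some_mem (row : List Int) (p : PySem.Set Int) (k : Int) (q : PySem.Set Int)
    (hq : pvGoRow p k row = some q) (i : Int) :
    i ∈ q ↔ i ∈ p ∨ ∃ j : Nat, ∃ h : j < row.length, row[j] = 10 ∧ i = k + (j : Int) := by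
  induction row generalizing p k with
  | nil =>
    simp only [pvGoRow, Option.some.injEq] at hq
    subst hq; simp
  | cons e rest ih =>
    simp only [pvGoRow] at hq
    by_cases he : e = 10
    · rw [if_pos he] at hq
      by_cases hk : PySem.Set.contains p k = true
      · rw [if_pos hk] at hq; cases hq
      · rw [if_neg hk] at hq
        rw [ih _ _ hq]
        constructor
        · rintro (hmem | ⟨j, hj, hv, rfl⟩)
          · rcases (PySem.Set.mem_add p k i).mp hmem with hp | rfl
            · exact Or.inl hp
            · exact Or.inr ⟨0, by simp, by simpa using he, by simp⟩
          · refine Or.inr ⟨j + 1, by simpa using hj, by simpa using hv, ?_⟩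
            push_cast; ring
        · rintro (hp | ⟨j, hj, hv, rfl⟩)
          · exact Or.inl ((PySem.Set.mem_add p k i).mpr (Or.inl hp))
          · match j with
            | 0 => exact Or.inl ((PySem.Set.mem_add p k _).mpr (Or.inr (by simp)))
            | j + 1 =>
              refine Or.inr ⟨j, by simpa using hj, by simpa using hv, ?_⟩
              push_cast; ring
    · rw [if_neg he] at hq
      rw [ih _ _ hq]
      constructor
      · rintro (hp | ⟨j, hj, hv, rfl⟩)
        · exact Or.inl hp
        · refine Or.inr ⟨j + 1, by simpa using hj, by simpa using hv, ?_⟩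
          push_cast; ring
      · rintro (hp | ⟨j, hj, hv, rfl⟩)
        · exact Or.inl hp
        · match j with
          | 0 => exact absurd (by simpa using hv) he
          | j + 1 =>
            refine Or.inr ⟨j, by simpa using hj, by simpa using hv, ?_⟩
            push_cast; ring

theorem pvCnt_cons (row : List Int) (rest : List (List Int)) (i : Int) :
    pvCnt (row :: rest) i = (if pvTenB row i then 1 else 0) + pvCnt rest i := by
  simp only [pvCnt, List.countP_cons]
  split_ifs <;> omega

theorem pvGoRows_iff (rows : List (List Int)) (p : PySem.Set Int) :
    pvGoRows p rows = true ↔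
      ∀ i : Int, (i ∈ p → pvCnt rows i = 0) ∧ pvCnt rows i ≤ 1 := by
  induction rows generalizing p with
  | nil => simp [pvGoRows, pvCnt]
  | cons row rest ih =>
    simp only [pvGoRows]
    cases hg : pvGoRow p 0 row with
    | none =>
      simp only [Bool.false_eq_true, false_iff]
      intro H
      rcases (pvGoRow_none_iff row p 0).mp hg with ⟨j, hj, hv, hmem⟩
      have hmem' : ((j : Int)) ∈ p := by simpa using hmem
      have h0 := (H (j : Int)).1 hmem'
      rw [pvCnt_cons] at h0
      have hten : pvTenB row (j : Int) = true := (pvTenB_iff row _).mpr ⟨j, hj, rfl, hv⟩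
      simp [hten] at h0
    | some q =>
      rw [ih]
      have hnn : ∀ j : Nat, ∀ h : j < row.length, row[j] = 10 → ((j : Int)) ∉ p := by
        intro j hj hv hmem
        exact absurd ((pvGoRow_none_iff row p 0).mpr ⟨j, hj, hv, by simpa using hmem⟩)
          (by simp [hg])
      have hq := pvGoRow_some_mem row p 0 q hg
      constructor
      · intro H i
        have Hi := H i
        have hqmem : i ∈ q ↔ i ∈ p ∨ pvTenB row i = true := by
          rw [hq i, pvTenB_iff]
          constructor
          · rintro (hp | ⟨j, hjl, hv, rfl⟩)
            · exact Or.inl hp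
            · exact Or.inr ⟨j, hjl, by simp, hv⟩
          · rintro (hp | ⟨j, hjl, rfl, hv⟩)
            · exact Or.inl hp
            · exact Or.inr ⟨j, hjl, hv, by simp⟩
        rw [pvCnt_cons]
        by_cases ht : pvTenB row i = true
        · have hiq : i ∈ q := hqmem.mpr (Or.inr ht)
          have h0 := Hi.1 hiq
          rcases (pvTenB_iff row i).mp ht with ⟨j, hjl, rfl, hv⟩
          constructor
          · intro hip; exact absurd hip (hnn j hjl hv)
          · simp [ht, h0]
        · simp only [ht, Bool.false_eq_true, if_false, Nat.zero_add]
          constructor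
          · intro hip; exact Hi.1 (hqmem.mpr (Or.inl hip))
          · exact Hi.2
      · intro H i
        have Hi := H i
        rw [pvCnt_cons] at Hi
        have hqmem : i ∈ q ↔ i ∈ p ∨ pvTenB row i = true := by
          rw [hq i, pvTenB_iff]
          constructor
          · rintro (hp | ⟨j, hjl, hv, rfl⟩)
            · exact Or.inl hp
            · exact Or.inr ⟨j, hjl, by simp, hv⟩
          · rintro (hp | ⟨j, hjl, rfl, hv⟩)
            · exact Or.inl hp
            · exact Or.inr ⟨j, hjl, hv, by simp⟩
        constructor
        · intro hiq
          rcases hqmem.mp hiq with hip | ht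
          · have := Hi.1 hip; split_ifs at this <;> omega
          · have := Hi.2; simp [ht] at this; omega
        · have := Hi.2; split_ifs at this <;> omega

theorem pvColCount_eq_acc (rows : List (List Int)) (i : Nat) (n : Nat) :
    rows.foldl (fun acc row => if h : i < row.length then (if row[i] = 10 then acc + 1 else acc) else acc) n
      = n + pvCnt rows (i : Int) := by
  induction rows generalizing n with
  | nil => simp [pvCnt]
  | cons row rest ih =>
    rw [List.foldl_cons, ih, pvCnt_cons]
    have hten : pvTenB row (i : Int) = true ↔ ∃ h : i < row.length, row[i] = 10 := by
      rw [pvTenB_iff]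
      constructor
      · rintro ⟨j, hj, hij, hv⟩
        have hij' : i = j := by omega
        subst hij'; exact ⟨hj, hv⟩
      · rintro ⟨hj, hv⟩; exact ⟨i, hj, rfl, hv⟩
    by_cases hl : i < row.length
    · by_cases hv : row[i]'hl = 10
      · have ht : pvTenB row (i : Int) = true := hten.mpr ⟨hl, hv⟩
        simp [hl, hv, ht]; omega
      · have ht : pvTenB row (i : Int) = false := by
          rw [Bool.eq_false_iff, Ne, hten]; rintro ⟨_, hv'⟩; exact hv hv'
        simp [hl, hv, ht]
    · have ht : pvTenB row (i : Int) = false := by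
        rw [Bool.eq_false_iff, Ne, hten]; rintro ⟨hl', _⟩; exact hl hl'
      simp [hl, ht]

theorem pvFoldlMax_le (rows : List (List Int)) (n : Nat) :
    n ≤ rows.foldl (fun m r => max m r.length) n := by
  induction rows generalizing n with
  | nil => simp
  | cons r rest ih => exact le_trans (le_max_left n r.length) (ih _)

theorem pvWidth_bound (rows : List (List Int)) (n : Nat) (row : List Int) (hmem : row ∈ rows) :
    row.length ≤ rows.foldl (fun m r => max m r.length) n := by
  induction rows generalizing n with
  | nil => cases hmem
  | cons r rest ih =>
    rw [List.foldl_cons]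
    rcases List.mem_cons.mp hmem with rfl | hmem
    · exact le_trans (le_max_right n row.length) (pvFoldlMax_le rest _)
    · exact ih _ hmem

theorem pvCnt_zero_of_ge (rows : List (List Int)) (i : Int)
    (h : ∀ row ∈ rows, (row.length : Int) ≤ i) : pvCnt rows i = 0 := by
  rw [pvCnt, List.countP_eq_zero]
  intro row hmem
  simp only [pvTenB_iff]
  rintro ⟨j, hj, rfl, _⟩
  have := h row hmem
  omega

theorem pvCnt_zero_of_neg (rows : List (List Int)) (i : Int) (h : i < 0) : pvCnt rows i = 0 := by
  rw [pvCnt, List.countP_eq_zero]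
  intro row _
  simp only [pvTenB_iff]
  rintro ⟨j, hj, rfl, _⟩
  omega

theorem pvAlt_iff (rows : List (List Int)) :
    are_blacks_sparse_alt rows = true ↔ ∀ i : Int, pvCnt rows i ≤ 1 := by
  unfold are_blacks_sparse_alt
  simp only [List.all_eq_true, List.mem_range, Bool.not_eq_eq_eq_not, Bool.not_true,
    decide_eq_false_iff_not, Nat.not_lt]
  constructor
  · intro H i
    by_cases h0 : 0 ≤ i
    · by_cases hw : i < ((rows.foldl (fun m r => max m r.length) 0 : Nat) : Int)
      · have hc := H i.toNat (by omega)
        unfold pvColCount at hc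
        rw [pvColCount_eq_acc] at hc
        simpa [Int.toNat_of_nonneg h0] using hc
      · have h0' : pvCnt rows i = 0 := by
          apply pvCnt_zero_of_ge
          intro row hmem
          have := pvWidth_bound rows 0 row hmem
          omega
        omega
    · have := pvCnt_zero_of_neg rows i (by omega)
      omega
  · intro H i _
    have := H (i : Int)
    unfold pvColCount
    rw [pvColCount_eq_acc]
    simpa using this

-- ===== VERDICT (by name: the statement is the Claim_ definition above) =====
theorem are_blacks_sparse_spec : Claim_equal_are_blacks_sparse := by
  intro rows _
  unfold Spec_are_blacks_sparse
  rw [Bool.eq_iff_iff]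
  rw [pvAlt_iff]
  unfold are_blacks_sparse
  rw [pvGoRows_iff]
  constructor
  · intro H i; exact (H i).2
  · intro H i
    refine ⟨fun hmem => absurd hmem ?_, H i⟩
    simp [PySem.Set.empty]
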